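-- pv_equiv track=rewrite | github.com/tarjantamas/Virtual-Controller-CNN | src/common/util.py | getArgumentParameterMap
-- ===== SOURCE A (Python) =====
-- def getArgumentParameterMap(argv):
--   '''
--   Maps arguments to their list of parameters.
--   :param argv: list of arguments from the command line
--   :return: a map which maps argument names to their parameters.
--   If the program is run in the following way:
--   python main.py --capturedata param1 param2 param3 --othercommand param1 param2
--   the return value will be:
--   {
--     '--capturedata': ['param1', 'param2', 'param3']
--     '--othercomand': ['param1', 'param2']
--   }
--   '''
--   argumentParameterMap = {}
--   i = 0
--   while i < len(argv):
--     arg = argv[i]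
--
--     j = i + 1
--     if '--' in arg:
--       params = []
--       while j < len(argv) and '--' not in argv[j]:
--         params.append(argv[j])
--         j += 1
--       argumentParameterMap[arg] = params
--     i = j
--   return argumentParameterMap
-- ===== SOURCE B (Python) =====
-- def getArgumentParameterMap(argv):
--   argumentParameterMap = {}
--   current = None
--   for tok in argv:
--     if '--' in tok:
--       current = tok
--       argumentParameterMap[current] = []
--     elif current is not None:
--       argumentParameterMap[current].append(tok)
--   return argumentParameterMap
-- ===== Notes on version B (the rewrite author's own statement) =====
-- stated objective: simpler
-- what changed: Replaces the two-pointer nested-while index scan with a single linear pass over argv that carries a 'current key' state, appending each parameter as it is seen instead of collecting a block with an inner indexed loop.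
import Mathlib
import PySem

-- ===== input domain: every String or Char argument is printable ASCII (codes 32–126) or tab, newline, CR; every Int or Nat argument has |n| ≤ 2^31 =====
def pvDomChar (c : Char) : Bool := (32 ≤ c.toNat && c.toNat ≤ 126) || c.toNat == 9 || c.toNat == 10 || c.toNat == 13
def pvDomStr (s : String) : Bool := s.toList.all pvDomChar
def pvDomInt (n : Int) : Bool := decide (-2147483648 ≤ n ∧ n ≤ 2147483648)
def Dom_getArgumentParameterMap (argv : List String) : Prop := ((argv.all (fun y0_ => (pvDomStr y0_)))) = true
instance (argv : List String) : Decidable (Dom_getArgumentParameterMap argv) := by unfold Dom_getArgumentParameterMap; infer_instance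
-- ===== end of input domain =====

-- B replaces A's two-pointer nested-while scan with one linear pass carrying a 'current key'
-- state; objective: simpler.

-- ===== PORT A =====
-- inner while of A: collect parameters until the next '--' token (or end); returns (params, remainder)
def pvCollectA : List String → List String × List String
  | [] => ([], [])
  | t :: rest =>
    if PySem.Str.isIn "--" t then ([], t :: rest)
    else
      let p := pvCollectA rest
      (t :: p.1, p.2)

theorem pvCollectA_len (rest : List String) : (pvCollectA rest).2.length ≤ rest.length := by
  induction rest with
  | nil => simp [pvCollectA]
  | cons t r ih =>
    simp only [pvCollectA]
    split
    · simp
    · simpa using Nat.le_succ_of_le ih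

-- outer while of A
def pvLoopA : List String → PySem.Dict String (List String) → PySem.Dict String (List String)
  | [], m => m
  | arg :: rest, m =>
    if PySem.Str.isIn "--" arg then
      pvLoopA (pvCollectA rest).2 (m.insert arg (pvCollectA rest).1)
    else
      pvLoopA rest m
termination_by l _ => l.length
decreasing_by
  · exact Nat.lt_succ_of_le (pvCollectA_len rest)
  · simp

def getArgumentParameterMap (argv : List String) : List (String × List String) :=
  (pvLoopA argv PySem.Dict.empty).items

-- ===== PORT B =====
-- one step of B's single pass: state = (map, current key)
def pvStepB (st : PySem.Dict String (List String) × Option String) (tok : String) :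
    PySem.Dict String (List String) × Option String :=
  if PySem.Str.isIn "--" tok then (st.1.insert tok [], some tok)
  else
    match st.2 with
    | some k => (st.1.modify k [] (· ++ [tok]), st.2)
    | none => st

def getArgumentParameterMap_alt (argv : List String) : List (String × List String) :=
  (argv.foldl pvStepB (PySem.Dict.empty, none)).1.items

-- ===== PRECONDITION & SPEC =====
def Spec_getArgumentParameterMap (argv : List String) (out : List (String × List String)) : Prop := out = getArgumentParameterMap_alt argv
instance (argv : List String) (out : List (String × List String)) : Decidable (Spec_getArgumentParameterMap argv out) := by unfold Spec_getArgumentParameterMap; infer_instance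

-- ===== CLAIM (what is proved, stated in full; the proofs are below) =====
def Claim_equal_getArgumentParameterMap : Prop := ∀ (argv : List String), Dom_getArgumentParameterMap argv → Spec_getArgumentParameterMap argv (getArgumentParameterMap argv)

-- ===== LEMMAS AND PROOFS =====

-- collectA splits rest into a non-'--' prefix and a remainder that is empty or '--'-headed
theorem pvCollectA_split (rest : List String) :
    rest = (pvCollectA rest).1 ++ (pvCollectA rest).2 ∧
    (∀ p ∈ (pvCollectA rest).1, PySem.Str.isIn "--" p = false) ∧
    ((pvCollectA rest).2 = [] ∨
      ∃ h tl, (pvCollectA rest).2 = h :: tl ∧ PySem.Str.isIn "--" h = true) := by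
  induction rest with
  | nil => exact ⟨rfl, by simp [pvCollectA], Or.inl rfl⟩
  | cons t r ih =>
    by_cases h : PySem.Str.isIn "--" t = true
    · simp only [pvCollectA, h, if_true]
      exact ⟨rfl, by simp, Or.inr ⟨t, r, rfl, h⟩⟩
    · simp only [pvCollectA, h, if_false]
      obtain ⟨h1, h2, h3⟩ := ih
      refine ⟨?_, ?_, h3⟩
      · simpa using h1
      · intro p hp
        rcases List.mem_cons.mp hp with rfl | hp
        · exact eq_false_of_ne_true h
        · exact h2 p hp

-- appending one parameter via modify equals growing the inserted list
theorem pvModify_insert (d : PySem.Dict String (List String)) (k : String)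
    (v : List String) (t : String) :
    (d.insert k v).modify k [] (· ++ [t]) = d.insert k (v ++ [t]) := by
  simp [PySem.Dict.modify, PySem.Dict.insert_insert_self, PySem.Dict.getD_insert_self]

-- B's pass over a block of non-'--' parameters accumulates them onto the current key
theorem pvFoldB_block (ps : List String) (hps : ∀ p ∈ ps, PySem.Str.isIn "--" p = false) :
    ∀ (r : List String) (m : PySem.Dict String (List String)) (k : String) (v : List String),
    List.foldl pvStepB (m.insert k v, some k) (ps ++ r) =
      List.foldl pvStepB (m.insert k (v ++ ps), some k) r := by
  induction ps with
  | nil => intro r m k v; simp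
  | cons p ps ih =>
    intro r m k v
    have hp : PySem.Str.isIn "--" p = false := hps p (by simp)
    have hps' : ∀ q ∈ ps, PySem.Str.isIn "--" q = false := fun q hq => hps q (by simp [hq])
    simp only [List.cons_append, List.foldl_cons, pvStepB, hp]
    rw [pvModify_insert]
    simpa using ih hps' r m k (v ++ [p])

-- at a block boundary (empty or '--'-headed remainder) the current key no longer matters
theorem pvFoldB_junction (r : List String)
    (hr : r = [] ∨ ∃ h tl, r = h :: tl ∧ PySem.Str.isIn "--" h = true)
    (m : PySem.Dict String (List String)) (k : String) :
    (List.foldl pvStepB (m, some k) r).1 = (List.foldl pvStepB (m, none) r).1 := by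
  rcases hr with rfl | ⟨h, tl, rfl, hh⟩
  · rfl
  · simp only [List.foldl_cons, pvStepB, hh, if_true]

-- main invariant: A's outer loop equals B's fold from a key-less state
theorem pvLoopA_eq_foldB (n : Nat) :
    ∀ (argv : List String), argv.length ≤ n →
    ∀ (m : PySem.Dict String (List String)),
      pvLoopA argv m = (List.foldl pvStepB (m, none) argv).1 := by
  induction n with
  | zero =>
    intro argv h m
    have : argv = [] := List.eq_nil_of_length_eq_zero (Nat.le_zero.mp h)
    subst this
    simp [pvLoopA]
  | succ n ih =>
    intro argv h m
    cases argv with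
    | nil => simp [pvLoopA]
    | cons t rest =>
      have hlen : rest.length ≤ n := by simpa using h
      by_cases ht : PySem.Str.isIn "--" t = true
      · obtain ⟨h1, h2, h3⟩ := pvCollectA_split rest
        simp only [pvLoopA, ht, if_true, List.foldl_cons, pvStepB]
        conv_rhs => rw [h1]
        rw [pvFoldB_block _ h2, List.nil_append, pvFoldB_junction _ h3]
        exact ih _ (le_trans (pvCollectA_len rest) hlen) _
      · simp only [pvLoopA, List.foldl_cons, pvStepB]
        rw [if_neg ht, if_neg ht]
        exact ih rest hlen m

-- ===== VERDICT (by name: the statement is the Claim_ definition above) =====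
theorem getArgumentParameterMap_spec : Claim_equal_getArgumentParameterMap := by
  intro argv _
  unfold Spec_getArgumentParameterMap getArgumentParameterMap getArgumentParameterMap_alt
  rw [pvLoopA_eq_foldB argv.length argv le_rfl]
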